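-- pv_equiv track=rewrite | github.com/gersteinlab/BioCoder | parsing/FunctionProcessing/filter_by_keyword.py | word_in_dictionary
-- ===== SOURCE A (Python) =====
-- def word_in_dictionary(input_string, dictionary):
--     count = 0
--     for word in dictionary:
--         if word in input_string:
--             count += 1
--             if count >= 15:
--                 return True
--     return False
-- ===== SOURCE B (Python) =====
-- def word_in_dictionary(input_string, dictionary):
--     # Index-based re-implementation: build the set of all substrings of the
--     # input no longer than the longest dictionary word, then count dictionary
--     # words by a single set lookup each.
--     maxlen = 0
--     for w in dictionary:
--         if len(w) > maxlen:
--             maxlen = len(w)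
--     subs = {""}
--     for i in range(len(input_string)):
--         for j in range(i + 1, min(i + maxlen, len(input_string)) + 1):
--             subs.add(input_string[i:j])
--     count = 0
--     for w in dictionary:
--         if w in subs:
--             count += 1
--     return count >= 15
-- ===== Notes on version B (the rewrite author's own statement) =====
-- stated objective: alternative
-- what changed: Instead of running one substring search over the whole input per dictionary word, B builds a hash-set index of all substrings of the input no longer than the longest dictionary word and then counts dictionary words by a single set lookup each, comparing the total against 15.
import Mathlib
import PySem

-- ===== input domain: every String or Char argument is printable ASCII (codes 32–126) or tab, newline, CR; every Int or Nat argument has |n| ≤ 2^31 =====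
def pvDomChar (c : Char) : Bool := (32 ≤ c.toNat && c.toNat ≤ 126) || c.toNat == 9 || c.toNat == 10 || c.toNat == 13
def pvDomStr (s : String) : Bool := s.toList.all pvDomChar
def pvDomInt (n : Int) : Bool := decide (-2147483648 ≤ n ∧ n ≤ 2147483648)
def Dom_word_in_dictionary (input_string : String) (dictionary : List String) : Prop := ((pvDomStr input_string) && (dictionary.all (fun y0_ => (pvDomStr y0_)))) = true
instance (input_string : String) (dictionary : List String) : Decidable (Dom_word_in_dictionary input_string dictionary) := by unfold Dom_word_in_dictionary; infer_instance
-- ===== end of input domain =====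

-- B replaces A's per-word substring searches by building a set of all input substrings up to the longest word's length and counting dictionary words by set lookup; objective: alternative.


-- ===== PORT A =====
-- the loop over `dictionary` with accumulator `count`, returning True as soon as count reaches 15
def wordLoopA (input_string : String) : List String → Nat → Bool
  | [], _ => false
  | w :: ws, count =>
    if PySem.Str.isIn w input_string then
      if count + 1 ≥ 15 then true else wordLoopA input_string ws (count + 1)
    else wordLoopA input_string ws count

def word_in_dictionary (input_string : String) (dictionary : List String) : Bool :=
  wordLoopA input_string dictionary 0

-- ===== PORT B =====
-- Source B's first loop: running maximum of the word lengths
def maxLenB : List String → Nat → Nat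
  | [], m => m
  | w :: ws, m => maxLenB ws (if w.toList.length > m then w.toList.length else m)

-- Source B's substring-index build: subs = {""}; for i in range(len(s)):
--   for j in range(i+1, min(i+maxlen, len(s))+1): subs.add(s[i:j])
-- the slice s[i:j] (0 ≤ i ≤ j ≤ len) is exactly (s.drop i).take (j - i)
def subsB (s : List Char) (L : Nat) : PySem.Set (List Char) :=
  (List.range s.length).foldl
    (fun acc i =>
      (List.range' (i + 1) (min (i + L) s.length + 1 - (i + 1))).foldl
        (fun a2 j => PySem.Set.add a2 ((s.drop i).take (j - i))) acc)
    (PySem.Set.ofList [[]])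

-- Source B's final loop: count dictionary words found in the set
def countB (subs : PySem.Set (List Char)) : List String → Nat → Nat
  | [], c => c
  | w :: ws, c => countB subs ws (if PySem.Set.contains subs w.toList then c + 1 else c)

def word_in_dictionary_alt (input_string : String) (dictionary : List String) : Bool :=
  decide (15 ≤ countB (subsB input_string.toList (maxLenB dictionary 0)) dictionary 0)

-- ===== PRECONDITION & SPEC =====
def Spec_word_in_dictionary (input_string : String) (dictionary : List String) (out : Bool) : Prop := out = word_in_dictionary_alt input_string dictionary
instance (input_string : String) (dictionary : List String) (out : Bool) : Decidable (Spec_word_in_dictionary input_string dictionary out) := by unfold Spec_word_in_dictionary; infer_instance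

-- ===== CLAIM (what is proved, stated in full; the proofs are below) =====
def Claim_equal_word_in_dictionary : Prop := ∀ (input_string : String) (dictionary : List String), Dom_word_in_dictionary input_string dictionary → Spec_word_in_dictionary input_string dictionary (word_in_dictionary input_string dictionary)

-- ===== LEMMAS AND PROOFS =====

-- A's loop answers "count of matching words reaches 15"
theorem wordLoopA_eq (input_string : String) (ws : List String) (c : Nat) (hc : c < 15) :
    wordLoopA input_string ws c
      = decide (15 ≤ c + ws.countP (fun word => PySem.Str.isIn word input_string)) := by
  induction ws generalizing c with
  | nil =>
    simp only [wordLoopA, List.countP_nil]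
    symm; rw [decide_eq_false_iff_not]; omega
  | cons w ws ih =>
    cases h : PySem.Str.isIn w input_string with
    | true =>
      by_cases h15 : c + 1 ≥ 15
      · rw [wordLoopA, if_pos h, if_pos h15, List.countP_cons, eq_comm, decide_eq_true_eq]
        simp only [h, reduceIte]
        omega
      · rw [wordLoopA, if_pos h, if_neg h15, ih (c + 1) (by omega), decide_eq_decide,
          List.countP_cons]
        simp only [h, reduceIte]
        omega
    | false =>
      rw [wordLoopA, if_neg (by simp only [h]; exact Bool.false_ne_true), ih c hc,
        decide_eq_decide, List.countP_cons]
      simp only [h, Bool.false_eq_true, reduceIte]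
      omega

-- B's counting loop is a countP
theorem countB_eq (subs : PySem.Set (List Char)) (ws : List String) (c : Nat) :
    countB subs ws c = c + ws.countP (fun w => PySem.Set.contains subs w.toList) := by
  induction ws generalizing c with
  | nil => simp [countB]
  | cons w ws ih =>
    rw [countB, List.countP_cons, ih]
    cases h : PySem.Set.contains subs w.toList <;> simp [Nat.add_assoc, Nat.add_comm]

-- every word length is bounded by the running maximum's final value
theorem maxLenB_mono (ws : List String) (m : Nat) : m ≤ maxLenB ws m := by
  induction ws generalizing m with
  | nil => simp [maxLenB]
  | cons w ws ih =>
    rw [maxLenB]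
    split_ifs with h
    · exact le_trans (by omega) (ih _)
    · exact ih m

theorem maxLenB_bound (ws : List String) (m : Nat) (w : String) (hw : w ∈ ws) :
    w.toList.length ≤ maxLenB ws m := by
  induction ws generalizing m with
  | nil => cases hw
  | cons v vs ih =>
    rw [maxLenB]
    rcases List.mem_cons.mp hw with h | h
    · subst h
      split_ifs with hv
      · exact maxLenB_mono vs _
      · exact le_trans (by omega) (maxLenB_mono vs m)
    · exact ih _ h

-- membership in a fold of Set.add's
theorem mem_foldl_set_add {α β : Type} [BEq α] [LawfulBEq α] (f : β → α) (l : List β)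
    (acc : PySem.Set α) (x : α) :
    x ∈ l.foldl (fun a b => PySem.Set.add a (f b)) acc ↔ x ∈ acc ∨ ∃ b ∈ l, x = f b := by
  induction l generalizing acc with
  | nil => simp
  | cons b bs ih =>
    rw [List.foldl_cons, ih, PySem.Set.mem_add]
    constructor
    · rintro (⟨h | h⟩ | ⟨b', hb', hx⟩)
      · exact Or.inl h
      · exact Or.inr ⟨b, List.mem_cons_self, h⟩
      · exact Or.inr ⟨b', List.mem_cons_of_mem _ hb', hx⟩
    · rintro (h | ⟨b', hb', hx⟩)
      · exact Or.inl (Or.inl h)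
      · rcases List.mem_cons.mp hb' with h | h
        · subst h; exact Or.inl (Or.inr hx)
        · exact Or.inr ⟨b', h, hx⟩

-- membership in the outer fold, given a characterisation of each step
theorem mem_foldl_outer {α : Type} [BEq α] (g : PySem.Set α → Nat → PySem.Set α)
    (P : Nat → α → Prop)
    (hg : ∀ acc i x, x ∈ g acc i ↔ x ∈ acc ∨ P i x) (l : List Nat)
    (acc : PySem.Set α) (x : α) :
    x ∈ l.foldl g acc ↔ x ∈ acc ∨ ∃ i ∈ l, P i x := by
  induction l generalizing acc with
  | nil => simp
  | cons i is ih =>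
    rw [List.foldl_cons, ih, hg]
    constructor
    · rintro (⟨h | h⟩ | ⟨i', hi', hx⟩)
      · exact Or.inl h
      · exact Or.inr ⟨i, List.mem_cons_self, h⟩
      · exact Or.inr ⟨i', List.mem_cons_of_mem _ hi', hx⟩
    · rintro (h | ⟨i', hi', hx⟩)
      · exact Or.inl (Or.inl h)
      · rcases List.mem_cons.mp hi' with h | h
        · subst h; exact Or.inl (Or.inr hx)
        · exact Or.inr ⟨i', h, hx⟩

theorem mem_subsB (s : List Char) (L : Nat) (x : List Char) :
    x ∈ subsB s L
      ↔ x = [] ∨ ∃ i, i < s.length ∧ ∃ j, i + 1 ≤ j ∧ j ≤ min (i + L) s.length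
          ∧ x = (s.drop i).take (j - i) := by
  unfold subsB
  rw [mem_foldl_outer _
    (fun i x => ∃ j, i + 1 ≤ j ∧ j ≤ min (i + L) s.length ∧ x = (s.drop i).take (j - i))
    (fun acc i x => by
      rw [mem_foldl_set_add]
      constructor
      · rintro (h | ⟨j, hj, hx⟩)
        · exact Or.inl h
        · rw [List.mem_range'_1] at hj
          exact Or.inr ⟨j, by omega, by omega, hx⟩
      · rintro (h | ⟨j, hj1, hj2, hx⟩)
        · exact Or.inl h
        · exact Or.inr ⟨j, List.mem_range'_1.mpr ⟨hj1, by omega⟩, hx⟩)]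
  constructor
  · rintro (h | ⟨i, hi, hx⟩)
    · exact Or.inl (by simpa using (PySem.Set.mem_ofList _ _).mp h)
    · exact Or.inr ⟨i, List.mem_range.mp hi, hx⟩
  · rintro (h | ⟨i, hi, hx⟩)
    · exact Or.inl ((PySem.Set.mem_ofList _ _).mpr (by simp [h]))
    · exact Or.inr ⟨i, List.mem_range.mpr hi, hx⟩

-- the index contains exactly the substrings of s of length ≤ L (and "")
theorem mem_subsB_iff_infix (s : List Char) (L : Nat) (x : List Char)
    (hx : x.length ≤ L) : x ∈ subsB s L ↔ x <:+: s := by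
  rw [mem_subsB]
  constructor
  · rintro (h | ⟨i, hi, j, hj1, hj2, hx'⟩)
    · subst h; exact List.nil_infix
    · subst hx'
      exact ((List.take_prefix _ _).isInfix).trans ((List.drop_suffix i s).isInfix)
  · rintro ⟨u, v, huv⟩
    by_cases hnil : x = []
    · exact Or.inl hnil
    · refine Or.inr ⟨u.length, ?_, u.length + x.length, by
        have := List.length_pos_of_ne_nil hnil; omega, ?_, ?_⟩
      · have hlen : s.length = u.length + x.length + v.length := by
          subst huv; simp; omega
        have := List.length_pos_of_ne_nil hnil
        omega
      · have hlen : s.length = u.length + x.length + v.length := by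
          subst huv; simp; omega
        omega
      · subst huv
        rw [List.append_assoc, List.drop_left, Nat.add_sub_cancel_left, List.take_left]

-- ===== VERDICT (by name: the statement is the Claim_ definition above) =====
theorem word_in_dictionary_spec : Claim_equal_word_in_dictionary := by
  intro s d _
  unfold Spec_word_in_dictionary word_in_dictionary word_in_dictionary_alt
  rw [wordLoopA_eq _ _ _ (by omega), countB_eq, decide_eq_decide]
  have hc : d.countP (fun w => PySem.Set.contains (subsB s.toList (maxLenB d 0)) w.toList)
      = d.countP (fun word => PySem.Str.isIn word s) := by
    refine List.countP_congr (fun w hw => ?_)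
    have hb := maxLenB_bound d 0 w hw
    cases h : PySem.Str.isIn w s with
    | true =>
      rw [PySem.Str.isIn_iff_infix] at h
      simpa [PySem.Set.contains_iff] using (mem_subsB_iff_infix s.toList _ w.toList hb).mpr h
    | false =>
      have : ¬ (w.toList <:+: s.toList) := by
        intro hin
        have h2 : PySem.Str.isIn w s = true := (PySem.Str.isIn_iff_infix w s).mpr hin
        rw [h2] at h; simp at h
      have := (mem_subsB_iff_infix s.toList _ w.toList hb).not.mpr this
      simpa [PySem.Set.contains_iff] using this
  rw [hc]
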